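-- pv_equiv track=rewrite | github.com/charnley/chemhelp | misc.py | get_indexes_with_stop
-- ===== SOURCE A (Python) =====
-- def get_indexes_with_stop(lines, pattern, stoppattern):
--
--     idxs = []
--
--     for i, line in enumerate(lines):
--         # if line.find(pattern) != -1:
--         if pattern in line:
--             idxs.append(i)
--             continue
--
--         # if line.find(stoppattern) != -1:
--         if stoppattern in line:
--             break
--
--     return idxs
-- ===== SOURCE B (Python) =====
-- def get_indexes_with_stop(lines, pattern, stoppattern):
--     # Truncation pass: first line that contains stoppattern but not pattern ends the scan.
--     cut = next((i for i, line in enumerate(lines)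
--                 if stoppattern in line and pattern not in line), len(lines))
--     # Selection pass over the truncated prefix.
--     return [i for i in range(cut) if pattern in lines[i]]
-- ===== Notes on version B (the rewrite author's own statement) =====
-- stated objective: idiomatic
-- what changed: A's single interleaved loop with continue/break is replaced by two differently-shaped passes: first compute the cut point via next() over a generator (first line containing stoppattern but not pattern), then a comprehension selecting matching indices from range(cut).
import Mathlib
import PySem

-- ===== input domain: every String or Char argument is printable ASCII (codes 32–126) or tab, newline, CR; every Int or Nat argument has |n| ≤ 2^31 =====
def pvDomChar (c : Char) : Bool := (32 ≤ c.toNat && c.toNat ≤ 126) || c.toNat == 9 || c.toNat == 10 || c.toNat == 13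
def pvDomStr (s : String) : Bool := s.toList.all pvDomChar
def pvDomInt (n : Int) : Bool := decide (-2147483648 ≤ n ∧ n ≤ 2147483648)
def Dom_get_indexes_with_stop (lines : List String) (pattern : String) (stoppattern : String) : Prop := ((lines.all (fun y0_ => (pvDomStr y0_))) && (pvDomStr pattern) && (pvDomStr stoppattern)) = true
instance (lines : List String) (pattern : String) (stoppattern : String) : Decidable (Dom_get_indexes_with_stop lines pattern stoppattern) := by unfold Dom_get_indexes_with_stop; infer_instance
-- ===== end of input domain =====

-- B replaces A's single interleaved loop-with-break by two passes: first find the cut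
-- point (first line with stoppattern but not pattern), then select matching indices
-- from the truncated prefix; objective: more idiomatic decomposition, same cost.

-- ===== PORT A =====
-- loop with `continue`/`break` over enumerate(lines), transliterated as structural recursion
def pvGoA (pattern stoppattern : String) : List (Int × String) → List Int
  | [] => []
  | (i, line) :: rest =>
    if PySem.Str.isIn pattern line then i :: pvGoA pattern stoppattern rest
    else if PySem.Str.isIn stoppattern line then []
    else pvGoA pattern stoppattern rest

def get_indexes_with_stop (lines : List String) (pattern : String) (stoppattern : String) : List Int :=
  pvGoA pattern stoppattern (PySem.List.enumerate lines)

-- ===== PORT B =====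
def get_indexes_with_stop_alt (lines : List String) (pattern : String) (stoppattern : String) : List Int :=
  -- cut = next((i for i, line in enumerate(lines) if stoppattern in line and pattern not in line), len(lines))
  let cut : Int :=
    (((PySem.List.enumerate lines).find?
        (fun il => PySem.Str.isIn stoppattern il.2 && !PySem.Str.isIn pattern il.2)).map (·.1)).getD
      (lines.length : Int)
  -- [i for i in range(cut) if pattern in lines[i]]
  (PySem.List.pyRange 0 cut 1).filter (fun i => PySem.Str.isIn pattern (PySem.List.pyGetD lines i ""))

-- ===== PRECONDITION & SPEC =====
def Spec_get_indexes_with_stop (lines : List String) (pattern : String) (stoppattern : String) (out : List Int) : Prop := out = get_indexes_with_stop_alt lines pattern stoppattern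
instance (lines : List String) (pattern : String) (stoppattern : String) (out : List Int) : Decidable (Spec_get_indexes_with_stop lines pattern stoppattern out) := by unfold Spec_get_indexes_with_stop; infer_instance

-- ===== CLAIM (what is proved, stated in full; the proofs are below) =====
def Claim_equal_get_indexes_with_stop : Prop := ∀ (lines : List String) (pattern : String) (stoppattern : String), Dom_get_indexes_with_stop lines pattern stoppattern → Spec_get_indexes_with_stop lines pattern stoppattern (get_indexes_with_stop lines pattern stoppattern)

-- ===== LEMMAS AND PROOFS =====

-- A's loop is: keep the prefix before the first "stop" line, take the matching indices.
theorem pvGoA_eq (pattern stoppattern : String) (l : List (Int × String)) :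
    pvGoA pattern stoppattern l =
      ((l.takeWhile (fun il => !(PySem.Str.isIn stoppattern il.2 && !PySem.Str.isIn pattern il.2))).filter
        (fun il => PySem.Str.isIn pattern il.2)).map (·.1) := by
  induction l with
  | nil => simp [pvGoA]
  | cons hd tl ih =>
    obtain ⟨i, line⟩ := hd
    cases hp : PySem.Str.isIn pattern line with
    | true =>
      simp only [PySem.Str.isIn_eq] at hp
      simp [pvGoA, hp, ih]
    | false =>
      cases hs : PySem.Str.isIn stoppattern line with
      | true =>
        simp only [PySem.Str.isIn_eq] at hp hs
        simp [pvGoA, hp, hs]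
      | false =>
        simp only [PySem.Str.isIn_eq] at hp hs
        simp [pvGoA, hp, hs, ih]

theorem pvFind?_eq_head?_dropWhile {α : Type} (p : α → Bool) (l : List α) :
    l.find? (fun x => !p x) = (l.dropWhile p).head? := by
  induction l with
  | nil => simp
  | cons hd tl ih =>
    by_cases h : p hd = true
    · simp [h, ih]
    · simp [h]

theorem pvDropWhile_eq_drop {α : Type} (p : α → Bool) (l : List α) :
    l.dropWhile p = l.drop (l.takeWhile p).length := by
  calc l.dropWhile p
      = ((l.takeWhile p) ++ l.dropWhile p).drop (l.takeWhile p).length := by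
        rw [List.drop_left]
    _ = l.drop (l.takeWhile p).length := by rw [List.takeWhile_append_dropWhile]

theorem pvTakeWhile_eq_take {α : Type} (p : α → Bool) (l : List α) :
    l.takeWhile p = l.take (l.takeWhile p).length := by
  calc l.takeWhile p
      = ((l.takeWhile p) ++ l.dropWhile p).take (l.takeWhile p).length := by
        rw [List.take_left]
    _ = l.take (l.takeWhile p).length := by rw [List.takeWhile_append_dropWhile]

theorem pvLength_takeWhile_le {α : Type} (p : α → Bool) (l : List α) :
    (l.takeWhile p).length ≤ l.length := by
  have h := congrArg List.length (List.takeWhile_append_dropWhile (p := p) (l := l))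
  rw [List.length_append] at h
  omega

theorem pvTake_pyRange (k n : Nat) (h : k ≤ n) :
    (PySem.List.pyRange 0 (n : Int) 1).take k = PySem.List.pyRange 0 (k : Int) 1 := by
  rw [PySem.List.pyRange_one, PySem.List.pyRange_one, ← List.map_take, List.take_range,
    Nat.min_eq_left (by simpa using h)]
  simp

-- ===== VERDICT (by name: the statement is the Claim_ definition above) =====
theorem get_indexes_with_stop_spec : Claim_equal_get_indexes_with_stop := by
  intro lines pattern stoppattern _
  unfold Spec_get_indexes_with_stop
  unfold get_indexes_with_stop get_indexes_with_stop_alt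
  set pb : (Int × String) → Bool :=
    fun il => !(PySem.Str.isIn stoppattern il.2 && !PySem.Str.isIn pattern il.2) with hpb
  set e := PySem.List.enumerate lines with he
  set k := (e.takeWhile pb).length with hk
  have hkn : k ≤ lines.length := by
    have := pvLength_takeWhile_le pb e
    simpa [hk, he, PySem.List.length_enumerate] using this
  -- the `next(...)` cut equals k
  have hfind : e.find? (fun il => PySem.Str.isIn stoppattern il.2 && !PySem.Str.isIn pattern il.2)
      = (e.drop k).head? := by
    rw [← pvDropWhile_eq_drop pb e, ← pvFind?_eq_head?_dropWhile pb e]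
    congr 1
    funext il
    simp [hpb]
  have hcut : (((e.find? (fun il => PySem.Str.isIn stoppattern il.2 && !PySem.Str.isIn pattern il.2)).map (·.1)).getD
      (lines.length : Int)) = (k : Int) := by
    rw [hfind, List.head?_drop]
    rcases Nat.lt_or_ge k lines.length with hlt | hge
    · have : e[k]? = some (((0:Int) + k), lines[k]) := by
        rw [he, PySem.List.getElem?_enumerate]
        simp [List.getElem?_eq_getElem hlt]
      simp [this]
    · have hkn' : k = lines.length := le_antisymm hkn hge
      have hnone : e[lines.length]? = none := by
        rw [List.getElem?_eq_none]
        simp [he, PySem.List.length_enumerate]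
      rw [hkn', hnone]
      simp
  rw [hcut]
  show pvGoA pattern stoppattern e
      = (PySem.List.pyRange 0 (k : Int) 1).filter
          (fun i => PySem.Str.isIn pattern (PySem.List.pyGetD lines i ""))
  rw [pvGoA_eq, ← hpb, pvTakeWhile_eq_take pb e, ← hk]
  have hmap : e = (PySem.List.pyRange 0 (lines.length : Int) 1).map
      (fun j => (j, PySem.List.pyGetD lines j "")) := by
    rw [he, PySem.List.enumerate_eq_map_pyRange (d := "")]
    simp
  rw [hmap, ← List.map_take, pvTake_pyRange k lines.length hkn, List.filter_map, List.map_map]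
  simp [Function.comp_def]
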